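-- pv_equiv track=rewrite | github.com/ramadevinehru/smart-premium-project | app.py | create_categorical_dict
-- ===== SOURCE A (Python) =====
-- def create_categorical_dict(columns, user_selections):
--     cat_dict = {}
--     for col in columns:
--         if any(col.startswith(key + "_") for key in user_selections):
--             for key, value in user_selections.items():
--                 if col == f"{key}_{value}":
--                     cat_dict[col] = 1
--     return cat_dict
-- ===== SOURCE B (Python) =====
-- def create_categorical_dict(columns, user_selections):
--     targets = {f"{key}_{value}" for key, value in user_selections.items()}
--     return {col: 1 for col in columns if col in targets}
-- ===== Notes on version B (the rewrite author's own statement) =====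
-- stated objective: faster
-- what changed: B precomputes the set of target strings key+'_'+value once, so the per-column startswith scan and the inner .items() loop of A disappear into a single O(1) set membership test per column.
import Mathlib
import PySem

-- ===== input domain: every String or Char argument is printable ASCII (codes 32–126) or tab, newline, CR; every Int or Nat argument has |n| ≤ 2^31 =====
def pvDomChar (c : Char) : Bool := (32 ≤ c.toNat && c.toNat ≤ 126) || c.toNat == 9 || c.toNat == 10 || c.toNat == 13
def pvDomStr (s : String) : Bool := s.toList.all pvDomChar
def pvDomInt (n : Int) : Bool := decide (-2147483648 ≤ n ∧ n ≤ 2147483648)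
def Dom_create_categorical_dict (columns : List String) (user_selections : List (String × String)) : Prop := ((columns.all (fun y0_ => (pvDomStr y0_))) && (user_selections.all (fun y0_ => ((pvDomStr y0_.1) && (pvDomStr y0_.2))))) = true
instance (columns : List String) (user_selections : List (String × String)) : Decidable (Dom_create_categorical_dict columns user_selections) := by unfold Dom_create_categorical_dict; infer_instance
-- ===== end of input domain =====

-- B replaces A's per-column startswith scan + inner .items() loop by one precomputed set of
-- target strings consulted with a single membership test per column (measurably faster).


-- ===== PORT A =====
-- for col in columns: if any(col.startswith(key+"_") for key in user_selections):
--   for key, value in user_selections.items(): if col == f"{key}_{value}": cat_dict[col] = 1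
def create_categorical_dict (columns : List String) (user_selections : List (String × String)) : List (String × Int) :=
  (columns.foldl (fun cat_dict col =>
      if user_selections.any (fun kv => PySem.Str.startswith col (kv.1 ++ "_")) then
        user_selections.foldl (fun cat_dict kv =>
          if col = kv.1 ++ "_" ++ kv.2 then cat_dict.insert col 1 else cat_dict) cat_dict
      else cat_dict)
    (PySem.Dict.empty : PySem.Dict String Int)).items

-- ===== PORT B =====
-- targets = {f"{key}_{value}" ...}; return {col: 1 for col in columns if col in targets}
def create_categorical_dict_alt (columns : List String) (user_selections : List (String × String)) : List (String × Int) :=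
  let targets : PySem.Set String :=
    PySem.Set.ofList (user_selections.map (fun kv => kv.1 ++ "_" ++ kv.2))
  (columns.foldl (fun d col =>
      if PySem.Set.contains targets col then d.insert col 1 else d)
    (PySem.Dict.empty : PySem.Dict String Int)).items

-- ===== PRECONDITION & SPEC =====
def Spec_create_categorical_dict (columns : List String) (user_selections : List (String × String)) (out : List (String × Int)) : Prop := out = create_categorical_dict_alt columns user_selections
instance (columns : List String) (user_selections : List (String × String)) (out : List (String × Int)) : Decidable (Spec_create_categorical_dict columns user_selections out) := by unfold Spec_create_categorical_dict; infer_instance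

-- ===== CLAIM (what is proved, stated in full; the proofs are below) =====
def Claim_equal_create_categorical_dict : Prop := ∀ (columns : List String) (user_selections : List (String × String)), Dom_create_categorical_dict columns user_selections → Spec_create_categorical_dict columns user_selections (create_categorical_dict columns user_selections)

-- ===== LEMMAS AND PROOFS =====

-- A's inner loop over user_selections inserts (col, 1) exactly when some pair builds col.
theorem ccd_inner (us : List (String × String)) (col : String) (d : PySem.Dict String Int) :
    us.foldl (fun cat_dict kv =>
        if col = kv.1 ++ "_" ++ kv.2 then cat_dict.insert col 1 else cat_dict) d
      = if us.any (fun kv => col == kv.1 ++ "_" ++ kv.2) then d.insert col 1 else d := by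
  induction us generalizing d with
  | nil => simp
  | cons kv us ih =>
    simp only [List.foldl_cons, List.any_cons]
    by_cases h : col = kv.1 ++ "_" ++ kv.2
    · have hb : (col == kv.1 ++ "_" ++ kv.2) = true := by simpa using h
      rw [if_pos h, ih]
      simp only [hb, Bool.true_or]
      split <;> simp [PySem.Dict.insert_insert_self]
    · have hb : (col == kv.1 ++ "_" ++ kv.2) = false := by simpa using h
      rw [if_neg h, ih]
      simp only [hb, Bool.false_or]

-- if col equals some key+"_"+value then col startswith key+"_".
theorem ccd_guard (us : List (String × String)) (col : String)
    (h : us.any (fun kv => col == kv.1 ++ "_" ++ kv.2) = true) :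
    us.any (fun kv => PySem.Str.startswith col (kv.1 ++ "_")) = true := by
  rw [List.any_eq_true] at h ⊢
  obtain ⟨kv, hmem, heq⟩ := h
  refine ⟨kv, hmem, ?_⟩
  have hc : col = kv.1 ++ "_" ++ kv.2 := by simpa using heq
  subst hc
  simp only [PySem.Str.startswith_eq]
  rw [PySem.Chars.startswith_iff]
  simp [String.toList_append]

-- B's set membership test equals A's "some pair builds col".
theorem ccd_contains (us : List (String × String)) (col : String) :
    PySem.Set.contains (PySem.Set.ofList (us.map (fun kv => kv.1 ++ "_" ++ kv.2))) col
      = us.any (fun kv => col == kv.1 ++ "_" ++ kv.2) := by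
  rw [Bool.eq_iff_iff, PySem.Set.contains_iff, PySem.Set.mem_ofList, List.mem_map,
    List.any_eq_true]
  constructor
  · rintro ⟨kv, hmem, heq⟩
    exact ⟨kv, hmem, by simpa using heq.symm⟩
  · rintro ⟨kv, hmem, heq⟩
    exact ⟨kv, hmem, by simpa using (eq_of_beq heq).symm⟩

-- the two per-column step functions agree.
theorem ccd_step (us : List (String × String)) (d : PySem.Dict String Int) (col : String) :
    (if us.any (fun kv => PySem.Str.startswith col (kv.1 ++ "_")) then
        us.foldl (fun cat_dict kv =>
          if col = kv.1 ++ "_" ++ kv.2 then cat_dict.insert col 1 else cat_dict) d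
      else d)
      = if PySem.Set.contains (PySem.Set.ofList (us.map (fun kv => kv.1 ++ "_" ++ kv.2))) col
        then d.insert col 1 else d := by
  rw [ccd_contains, ccd_inner]
  by_cases hany : us.any (fun kv => col == kv.1 ++ "_" ++ kv.2) = true
  · rw [ccd_guard us col hany, hany]
    simp
  · rw [Bool.not_eq_true] at hany
    rw [hany]
    simp

-- ===== VERDICT (by name: the statement is the Claim_ definition above) =====
theorem create_categorical_dict_spec : Claim_equal_create_categorical_dict := by
  intro columns us _
  show create_categorical_dict columns us = create_categorical_dict_alt columns us
  exact congrArg PySem.Dict.items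
    (congrArg (fun f => List.foldl f (PySem.Dict.empty : PySem.Dict String Int) columns)
      (funext fun d => funext fun col => ccd_step us d col))
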